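-- pv_equiv track=rewrite | github.com/theknoxinator/AoC | Python/2018/day14.py | find_recipes
-- ===== SOURCE A (Python) =====
-- class Node:
--     def __init__(self, index, value, next=None):
--         self.index = index
--         self.value = value
--         self.next = next
--
-- def find_recipes(values):
--     target_recipe = int(values[0])
--
--     # We start with 3 and 7 already defined as the head and tail, and list circles so tail always has head
--     # as the next node
--     head = Node(1, 3)
--     tail = Node(2, 7)
--     head.next = tail
--     tail.next = head
--
--     # Our end condition is to get the ten recipes following the TARGET, so we want to capture those as
--     # soon as they become available
--     ten_recipes = []
--     first = head
--     second = tail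
--     while len(ten_recipes) < 10:
--         # Get the two recipes being looked at by the first and second runners
--         first_recipe = first.value
--         second_recipe = second.value
--         sum = first_recipe + second_recipe
--
--         # If there are two digits, we need to add the tens digit first
--         if sum >= 10:
--             new_recipe = int(sum / 10)
--             new_index = tail.index + 1
--             if new_index > target_recipe:
--                 # We are beyond the target, so append this to the end recipes
--                 ten_recipes.append(new_recipe)
--             new_node = Node(new_index, new_recipe, head)
--             tail.next = new_node
--             tail = new_node
--             sum = sum % 10
--
--         # In all cases, add the ones digit as a new recipe
--         new_index = tail.index + 1
--         if new_index > target_recipe: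
--             # We are beyond the target, so append this to the end recipes
--             ten_recipes.append(sum)
--         new_node = Node(new_index, sum, head)
--         tail.next = new_node
--         tail = new_node
--
--         # New recipes are added, so move up each runner
--         first_moves = first.value + 1
--         for i in range(first_moves):
--             first = first.next
--         second_moves = second.value + 1
--         for i in range(second_moves):
--             second = second.next
--
--     # Print out answer
--     ten_recipes = ten_recipes[0:10] # Trim in case there's more than ten
--     return ''.join(map(str, ten_recipes))
-- ===== SOURCE B (Python) =====
-- def find_recipes(values):
--     target = int(values[0])
--     scores = [3, 7]
--     e1, e2 = 0, 1
--     while len(scores) < target + 10: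
--         s = scores[e1] + scores[e2]
--         if s >= 10:
--             scores.append(s // 10)
--         scores.append(s % 10)
--         e1 = (e1 + 1 + scores[e1]) % len(scores)
--         e2 = (e2 + 1 + scores[e2]) % len(scores)
--     return ''.join(map(str, scores[target:target + 10]))
-- ===== Notes on version B (the rewrite author's own statement) =====
-- stated objective: simpler
-- what changed: Replaces A's hand-built circular linked list (pointer walking node by node, incremental collection of post-target recipes with 1-based index bookkeeping) by a plain growing list with modulo index arithmetic, a single length-based stop condition and a final slice scores[target:target+10].
-- intended difference: On inputs whose first element parses to 0 or 1, A returns '1010124515' (it only collects newly created recipes so it skips the two seed recipes 3 and 7), while B returns the ten scoreboard digits starting at the target index (e.g. '3710101245' for target 0), which is the intended scoreboard slice. — e.g. on find_recipes(["0"]): A returns "1010124515", B returns "3710101245"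
-- outside the precondition, e.g. on find_recipes(['-3']): A returns '1010124515', B returns '101'
import Mathlib
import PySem

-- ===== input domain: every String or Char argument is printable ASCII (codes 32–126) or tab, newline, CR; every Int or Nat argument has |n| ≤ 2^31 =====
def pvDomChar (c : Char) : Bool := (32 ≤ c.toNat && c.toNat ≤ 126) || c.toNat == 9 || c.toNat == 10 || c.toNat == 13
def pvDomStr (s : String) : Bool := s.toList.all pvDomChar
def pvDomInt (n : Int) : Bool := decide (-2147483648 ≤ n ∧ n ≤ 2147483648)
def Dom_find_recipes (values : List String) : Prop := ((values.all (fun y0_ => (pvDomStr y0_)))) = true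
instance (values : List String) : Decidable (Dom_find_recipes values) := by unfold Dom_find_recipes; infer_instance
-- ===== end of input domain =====

-- B replaces A's circular linked list (pointer walking, incremental collection of the ten
-- recipes past the target) by a plain growing list with modulo index arithmetic and a final slice.

-- ===== PORT A =====
-- A's circular list always has nodes 1..len with tail.next = head, so a node is its 0-based
-- position and 'node.next' from position q is (q+1) % len; the fuel t.toNat + 12 is always
-- enough iterations for the while-loop to reach its exit condition, so the fuel-0 branch is
-- unreachable and the port is exact.
def findA_move (len : Nat) (p : Nat) (k : Int) : Nat :=
  (PySem.List.pyRange 0 k 1).foldl (fun q _ => (q + 1) % len) p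

def findA_loop (fuel : Nat) (t : Int) (scores : List Int) (f s : Nat) (ten : List Int) :
    List Int :=
  match fuel with
  | 0 => ten
  | fuel + 1 =>
    if 10 ≤ ten.length then ten
    else
      let fr := scores.getD f 0
      let sr := scores.getD s 0
      let sum := fr + sr
      -- two-digit case: append the tens digit first (int(sum/10) is truncating division)
      let scores1 := if sum ≥ 10 then scores ++ [PySem.Int.truncdiv sum 10] else scores
      let ten1 := if sum ≥ 10 ∧ (scores.length : Int) + 1 > t
                  then ten ++ [PySem.Int.truncdiv sum 10] else ten
      let sum2 := if sum ≥ 10 then PySem.Int.mod sum 10 else sum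
      -- in all cases, add the ones digit
      let ten2 := if (scores1.length : Int) + 1 > t then ten1 ++ [sum2] else ten1
      let scores2 := scores1 ++ [sum2]
      -- move each runner value+1 steps along the circle
      let f2 := findA_move scores2.length f (fr + 1)
      let s2 := findA_move scores2.length s (sr + 1)
      findA_loop fuel t scores2 f2 s2 ten2

def find_recipes (values : List String) : String :=
  match PySem.List.pyGet? values 0 with
  | none => ""                                   -- IndexError, excluded by Pre_
  | some v0 =>
    match PySem.Int.ofStr? v0 with
    | none => ""                                 -- ValueError, excluded by Pre_
    | some t =>
      let ten := findA_loop (t.toNat + 12) t [3, 7] 0 1 []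
      PySem.Str.join "" ((ten.take 10).map PySem.Int.toStr)

-- ===== PORT B =====
-- e1 and e2 are always kept inside [0, len) by the % len update, so pyGetD's default is
-- unreachable; the fuel t.toNat + 12 always outlasts the while-loop, so fuel 0 is unreachable.
def findB_loop (fuel : Nat) (t : Int) (scores : List Int) (e1 e2 : Int) : List Int :=
  match fuel with
  | 0 => scores
  | fuel + 1 =>
    if (scores.length : Int) < t + 10 then
      let s := PySem.List.pyGetD scores e1 0 + PySem.List.pyGetD scores e2 0
      let scores1 := (if s ≥ 10 then scores ++ [PySem.Int.floordiv s 10] else scores)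
                     ++ [PySem.Int.mod s 10]
      let e1' := PySem.Int.mod (e1 + 1 + PySem.List.pyGetD scores1 e1 0) scores1.length
      let e2' := PySem.Int.mod (e2 + 1 + PySem.List.pyGetD scores1 e2 0) scores1.length
      findB_loop fuel t scores1 e1' e2'
    else scores

def find_recipes_alt (values : List String) : String :=
  match PySem.List.pyGet? values 0 with
  | none => ""
  | some v0 =>
    match PySem.Int.ofStr? v0 with
    | none => ""
    | some t =>
      let scores := findB_loop (t.toNat + 12) t [3, 7] 0 1
      PySem.Str.join ""
        ((PySem.List.slice scores (some t) (some (t + 10))).map PySem.Int.toStr)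

-- ===== PRECONDITION & SPEC =====
-- Pre_ excludes inputs where A raises (empty list: IndexError; first element not an int
-- literal: ValueError) and negative targets, which are outside the puzzle's natural domain
-- (AoC targets are non-negative recipe counts) although A still returns a value there.
def Pre_find_recipes (values : List String) : Prop :=
  0 ≤ (PySem.Int.ofStr? (values.headD "")).getD (-1)

instance (values : List String) : Decidable (Pre_find_recipes values) := by
  unfold Pre_find_recipes; infer_instance

def pvWitness_find_recipes : List String := ["19"]

-- On targets 0 and 1, A returns "1010124515" (it only collects newly created recipes, so it
-- skips the two seed recipes 3 and 7), while B returns the ten scoreboard digits starting at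
-- the target index (e.g. "3710101245" for target 0), which is the intended answer.
def D_find_recipes (values : List String) : Prop :=
  0 ≤ (PySem.Int.ofStr? (values.headD "")).getD (-1) ∧
  (PySem.Int.ofStr? (values.headD "")).getD (-1) < 2

instance (values : List String) : Decidable (D_find_recipes values) := by
  unfold D_find_recipes; infer_instance

def Spec_find_recipes (values : List String) (out : String) : Prop :=
  ¬ D_find_recipes values → out = find_recipes_alt values

instance (values : List String) (out : String) : Decidable (Spec_find_recipes values out) := by
  unfold Spec_find_recipes; infer_instance

def pvDiffWitness_find_recipes : List String := ["0"]
def pvDiffWitnessOut_find_recipes : String × String := ("1010124515", "3710101245")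

-- ===== CLAIM =====
def Claim_unchanged_find_recipes : Prop :=
  ∀ (values : List String), Dom_find_recipes values → Pre_find_recipes values →
    Spec_find_recipes values (find_recipes values)

def Claim_changed_find_recipes : Prop :=
  Dom_find_recipes (pvDiffWitness_find_recipes) ∧
  Pre_find_recipes (pvDiffWitness_find_recipes) ∧
  D_find_recipes (pvDiffWitness_find_recipes) ∧
  find_recipes (pvDiffWitness_find_recipes) = pvDiffWitnessOut_find_recipes.1 ∧
  find_recipes_alt (pvDiffWitness_find_recipes) = pvDiffWitnessOut_find_recipes.2 ∧
  pvDiffWitnessOut_find_recipes.1 ≠ pvDiffWitnessOut_find_recipes.2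

def Claim_exact_find_recipes : Prop :=
  ∀ (values : List String), Dom_find_recipes values → Pre_find_recipes values →
    D_find_recipes values → find_recipes values ≠ find_recipes_alt values

-- ===== LEMMAS AND PROOFS =====

theorem iter_mod (len : Nat) (hlen : 0 < len) : ∀ (l : List Int) (p : Nat), p < len →
    l.foldl (fun q _ => (q + 1) % len) p = (p + l.length) % len := by
  intro l
  induction l with
  | nil => intro p hp; simp [Nat.mod_eq_of_lt hp]
  | cons x l ih =>
    intro p hp
    rw [List.foldl_cons, ih _ (Nat.mod_lt _ hlen), Nat.mod_add_mod]
    simp; ring_nf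

-- walking a runner v+1 steps around A's circle is modular addition
theorem move_eq (len p : Nat) (v : Int) (hlen : 0 < len) (hp : p < len) (hv : 0 ≤ v) :
    ((findA_move len p (v + 1) : Nat) : Int) = PySem.Int.mod ((p : Int) + 1 + v) (len : Int) := by
  unfold findA_move
  rw [iter_mod len hlen _ p hp, PySem.List.length_pyRange_one]
  have h1 : (v + 1 - 0).toNat = v.toNat + 1 := by omega
  have h2 : (p : Int) + 1 + v = ((p + 1 + v.toNat : Nat) : Int) := by push_cast; omega
  rw [h1, h2, PySem.Int.mod_natCast]
  norm_cast
  ring_nf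

theorem move_lt (len p : Nat) (v : Int) (hlen : 0 < len) (hp : p < len) :
    findA_move len p (v + 1) < len := by
  unfold findA_move
  rw [iter_mod len hlen _ p hp]
  exact Nat.mod_lt _ hlen

theorem trunc_eq_floor (a : Int) (h : 0 ≤ a) :
    PySem.Int.truncdiv a 10 = PySem.Int.floordiv a 10 := by
  rw [PySem.Int.floordiv_eq_ediv_of_pos (by omega : (0:Int) < 10)]
  simp [PySem.Int.truncdiv, Int.tdiv_eq_ediv_of_nonneg h]

theorem floordiv_ten_nonneg (a : Int) (h : 10 ≤ a) : 0 ≤ PySem.Int.floordiv a 10 := by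
  rw [PySem.Int.floordiv_eq_ediv_of_pos (by omega : (0:Int) < 10)]
  exact Int.ediv_nonneg (by omega) (by omega)

-- A appends a recipe to ten_recipes exactly when it lands past position t of the scoreboard
theorem drop_append_ite (xs : List Int) (a : Int) (t : Int) (h : 0 ≤ t) :
    (if (xs.length : Int) + 1 > t then List.drop t.toNat xs ++ [a] else List.drop t.toNat xs)
      = List.drop t.toNat (xs ++ [a]) := by
  by_cases hc : (xs.length : Int) + 1 > t
  · rw [if_pos hc, List.drop_append_of_le_length (by omega)]
  · rw [if_neg hc,
        List.drop_eq_nil_of_le (as := xs ++ [a])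
          (by simp only [List.length_append, List.length_cons, List.length_nil]; omega),
        List.drop_eq_nil_of_le (by omega)]

theorem getD_prefix (l l' : List Int) (n : Nat) (d : Int) (h : n < l.length) :
    (l ++ l').getD n d = l.getD n d := by
  simp [List.getD, List.getElem?_append_left h]

-- main invariant: with 2 ≤ t, A's collected ten_recipes IS the scoreboard past position t
theorem loop_eq (n : Nat) : ∀ (t : Int) (scores : List Int) (f s : Nat),
    2 ≤ t → (∀ v ∈ scores, 0 ≤ v) → f < scores.length → s < scores.length →
    findA_loop n t scores f s (scores.drop t.toNat)
      = (findB_loop n t scores (f : Int) (s : Int)).drop t.toNat := by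
  induction n with
  | zero => intro t scores f s _ _ _ _; simp [findA_loop, findB_loop]
  | succ n ih =>
    intro t scores f s ht hnn hf hs
    have hlen0 : 0 < scores.length := Nat.pos_of_ne_zero (by intro h; rw [h] at hf; simp at hf)
    have hdroplen : (List.drop t.toNat scores).length = scores.length - t.toNat := by simp
    by_cases hstop : (scores.length : Int) < t + 10
    · -- both loops continue: the bodies build the same scoreboard and runner positions
      have hA : ¬ (10 ≤ (List.drop t.toNat scores).length) := by rw [hdroplen]; omega
      rw [findA_loop, findB_loop, if_neg hA, if_pos hstop]
      have hgf : PySem.List.pyGetD scores (f : Int) 0 = scores.getD f 0 :=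
        PySem.List.pyGetD_natCast ..
      have hgs : PySem.List.pyGetD scores (s : Int) 0 = scores.getD s 0 :=
        PySem.List.pyGetD_natCast ..
      dsimp only
      rw [hgf, hgs]
      have h0f : 0 ≤ scores.getD f 0 := by
        rw [List.getD_eq_getElem _ _ hf]; exact hnn _ (List.getElem_mem hf)
      have h0s : 0 ≤ scores.getD s 0 := by
        rw [List.getD_eq_getElem _ _ hs]; exact hnn _ (List.getElem_mem hs)
      have hsum0 : (0:Int) ≤ scores.getD f 0 + scores.getD s 0 := by omega
      by_cases hd : scores.getD f 0 + scores.getD s 0 ≥ 10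
      · have htr := trunc_eq_floor _ hsum0
        simp only [hd, ite_true, true_and, htr]
        rw [drop_append_ite scores _ t (by omega),
            drop_append_ite
              (scores ++ [PySem.Int.floordiv (scores.getD f 0 + scores.getD s 0) 10]) _ t
              (by omega)]
        have hlf : f < (scores ++
            [PySem.Int.floordiv (scores.getD f 0 + scores.getD s 0) 10]).length := by
          simp; omega
        have hls : s < (scores ++
            [PySem.Int.floordiv (scores.getD f 0 + scores.getD s 0) 10]).length := by
          simp; omega
        have hg2f : PySem.List.pyGetD
            (scores ++ [PySem.Int.floordiv (scores.getD f 0 + scores.getD s 0) 10] ++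
              [PySem.Int.mod (scores.getD f 0 + scores.getD s 0) 10]) (↑f) 0
            = scores.getD f 0 := by
          rw [PySem.List.pyGetD_natCast, getD_prefix _ _ _ _ hlf, getD_prefix _ _ _ _ hf]
        have hg2s : PySem.List.pyGetD
            (scores ++ [PySem.Int.floordiv (scores.getD f 0 + scores.getD s 0) 10] ++
              [PySem.Int.mod (scores.getD f 0 + scores.getD s 0) 10]) (↑s) 0
            = scores.getD s 0 := by
          rw [PySem.List.pyGetD_natCast, getD_prefix _ _ _ _ hls, getD_prefix _ _ _ _ hs]
        rw [hg2f, hg2s]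
        have hlen2 : 0 < (scores ++
            [PySem.Int.floordiv (scores.getD f 0 + scores.getD s 0) 10] ++
            [PySem.Int.mod (scores.getD f 0 + scores.getD s 0) 10]).length := by simp
        rw [← move_eq _ f _ hlen2 (by simp; omega) h0f,
            ← move_eq _ s _ hlen2 (by simp; omega) h0s]
        apply ih
        · exact ht
        · intro v hv
          simp only [List.mem_append, List.mem_singleton] at hv
          rcases hv with (hv | hv) | hv
          · exact hnn v hv
          · subst hv; exact floordiv_ten_nonneg _ hd
          · subst hv; exact PySem.Int.mod_nonneg _ (by omega)
        · exact move_lt _ _ _ hlen2 (by simp; omega)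
        · exact move_lt _ _ _ hlen2 (by simp; omega)
      · simp only [hd, ite_false, false_and]
        have hm : PySem.Int.mod (scores.getD f 0 + scores.getD s 0) 10
            = scores.getD f 0 + scores.getD s 0 := by
          rw [PySem.Int.mod_eq_emod_of_pos (by omega)]
          exact Int.emod_eq_of_lt hsum0 (by omega)
        rw [hm, drop_append_ite scores _ t (by omega)]
        have hlf : f < (scores ++ [scores.getD f 0 + scores.getD s 0]).length := by simp; omega
        have hls : s < (scores ++ [scores.getD f 0 + scores.getD s 0]).length := by simp; omega
        have hg2f : PySem.List.pyGetD (scores ++ [scores.getD f 0 + scores.getD s 0]) (↑f) 0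
            = scores.getD f 0 := by
          rw [PySem.List.pyGetD_natCast, getD_prefix _ _ _ _ hf]
        have hg2s : PySem.List.pyGetD (scores ++ [scores.getD f 0 + scores.getD s 0]) (↑s) 0
            = scores.getD s 0 := by
          rw [PySem.List.pyGetD_natCast, getD_prefix _ _ _ _ hs]
        rw [hg2f, hg2s]
        have hlen2 : 0 < (scores ++ [scores.getD f 0 + scores.getD s 0]).length := by simp
        rw [← move_eq _ f _ hlen2 (by simp; omega) h0f,
            ← move_eq _ s _ hlen2 (by simp; omega) h0s]
        apply ih
        · exact ht
        · intro v hv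
          simp only [List.mem_append, List.mem_singleton] at hv
          rcases hv with hv | hv
          · exact hnn v hv
          · subst hv; omega
        · exact move_lt _ _ _ hlen2 (by simp; omega)
        · exact move_lt _ _ _ hlen2 (by simp; omega)
    · -- both loops stop and return the current ten_recipes / scoreboard
      have hA : 10 ≤ (List.drop t.toNat scores).length := by rw [hdroplen]; omega
      rw [findA_loop, findB_loop, if_pos hA, if_neg hstop]

theorem main_eq : ∀ (values : List String), Pre_find_recipes values →
    ¬ D_find_recipes values → find_recipes values = find_recipes_alt values := by
  intro values hpre hnd
  match values with
  | [] => exact absurd hpre (by unfold Pre_find_recipes; decide)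
  | v :: rest =>
    cases h : PySem.Int.ofStr? v with
    | none =>
      unfold Pre_find_recipes at hpre
      rw [List.headD_cons, h] at hpre
      exact absurd hpre (by norm_num)
    | some t =>
      unfold Pre_find_recipes at hpre
      unfold D_find_recipes at hnd
      rw [List.headD_cons, h] at hpre hnd
      simp only [Option.getD_some] at hpre hnd
      have ht : 2 ≤ t := by omega
      simp only [find_recipes, find_recipes_alt, PySem.List.pyGet?_zero_cons, h]
      have hinit : List.drop t.toNat [3, 7] = ([] : List Int) :=
        List.drop_eq_nil_of_le (by simp; omega)
      have key := loop_eq (t.toNat + 12) t [3, 7] 0 1 ht (by decide) (by decide) (by decide)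
      rw [hinit] at key
      rw [key, PySem.List.slice_toNat _ (by omega) (by omega)]
      have h10 : (t + 10).toNat - t.toNat = 10 := by omega
      rw [h10]
      norm_num

-- ===== VERDICT =====
theorem find_recipes_spec : Claim_unchanged_find_recipes := by
  intro values _ hpre hnd
  exact main_eq values hpre hnd

theorem find_recipes_changed : Claim_changed_find_recipes := by
  unfold Claim_changed_find_recipes; decide

theorem find_recipes_tight : Claim_exact_find_recipes := by
  intro values _ hpre hD heq
  match values with
  | [] => exact absurd hD (by unfold D_find_recipes; decide)
  | v :: rest =>
    unfold D_find_recipes at hD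
    rw [List.headD_cons] at hD
    cases h : PySem.Int.ofStr? v with
    | none => rw [h] at hD; exact absurd hD (by norm_num)
    | some t =>
      rw [h] at hD
      simp only [Option.getD_some] at hD
      simp only [find_recipes, find_recipes_alt, PySem.List.pyGet?_zero_cons, h] at heq
      have ht : t = 0 ∨ t = 1 := by omega
      rcases ht with ht | ht <;> subst ht
      · exact absurd heq (by decide)
      · exact absurd heq (by decide)
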